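-- pv_equiv track=rewrite | github.com/kiannang/workzone_metrics | src/workzone_metrics/metrics/state.py | _labels_from_intervals
-- ===== SOURCE A (Python) =====
-- from typing import Dict, List, Tuple, Optional
--
-- StateIntervals = Dict[str, List[Tuple[int, int]]]
--
-- DEFAULT_STATE_ORDER = ["inside", "exiting", "approaching", "outside"]
--
-- def _labels_from_intervals(
--     states: StateIntervals,
--     total_frames: int,
--     order: List[str] = None,
--     default_label: str = "outside",
-- ) -> List[str]:
--     if order is None:
--         order = DEFAULT_STATE_ORDER
--     labels = [default_label] * total_frames
--     for state in order:
--         intervals = states.get(state, [])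
--         for start, end in intervals:
--             start = max(0, start)
--             end = min(total_frames - 1, end)
--             for i in range(start, end + 1):
--                 labels[i] = state
--     return labels
-- ===== SOURCE B (Python) =====
-- DEFAULT_STATE_ORDER = ["inside", "exiting", "approaching", "outside"]
--
-- def _labels_from_intervals(states, total_frames, order=None, default_label="outside"):
--     # Per-frame lookup: the final label of frame i is the last state in `order`
--     # whose intervals cover i (later states overwrite earlier ones), else default.
--     if order is None:
--         order = DEFAULT_STATE_ORDER
--     rev = [(st, states.get(st, [])) for st in reversed(order)]
--     return [
--         next((st for st, ivs in rev if any(s <= i <= e for s, e in ivs)),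
--              default_label)
--         for i in range(total_frames)
--     ]
-- ===== Notes on version B (the rewrite author's own statement) =====
-- stated objective: alternative
-- what changed: B builds the result per frame: for each frame index it searches reversed(order) for the first state whose intervals cover that frame (a pure lookup, no array mutation), instead of A's in-place overwrite sweep over states and intervals.
import Mathlib
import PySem

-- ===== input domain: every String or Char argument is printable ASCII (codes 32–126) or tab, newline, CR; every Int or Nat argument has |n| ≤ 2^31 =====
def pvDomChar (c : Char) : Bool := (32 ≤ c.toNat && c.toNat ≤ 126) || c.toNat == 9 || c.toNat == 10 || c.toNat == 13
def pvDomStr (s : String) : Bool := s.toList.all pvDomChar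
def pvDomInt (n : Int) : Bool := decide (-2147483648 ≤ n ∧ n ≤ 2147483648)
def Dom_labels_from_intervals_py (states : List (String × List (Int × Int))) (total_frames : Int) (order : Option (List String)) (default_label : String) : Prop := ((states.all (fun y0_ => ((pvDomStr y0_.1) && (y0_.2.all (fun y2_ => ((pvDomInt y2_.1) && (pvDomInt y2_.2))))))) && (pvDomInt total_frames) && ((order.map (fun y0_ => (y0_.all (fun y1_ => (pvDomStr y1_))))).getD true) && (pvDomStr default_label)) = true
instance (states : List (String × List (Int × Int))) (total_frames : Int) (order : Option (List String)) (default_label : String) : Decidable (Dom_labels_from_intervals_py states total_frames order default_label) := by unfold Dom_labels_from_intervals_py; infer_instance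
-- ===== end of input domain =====

-- B replaces A's in-place overwrite sweep by a pure per-frame lookup: each frame's label is the
-- first state of reversed(order) covering it; alternative decomposition, no mutation.

-- ===== PORT A =====
def labels_from_intervals_py (states : List (String × List (Int × Int))) (total_frames : Int) (order : Option (List String)) (default_label : String) : List String :=
  let ord := match order with
    | none => ["inside", "exiting", "approaching", "outside"]
    | some o => o
  let labels := List.replicate total_frames.toNat default_label
  ord.foldl (fun labels state =>
    let intervals := (PySem.Dict.mk states).getD state []
    intervals.foldl (fun labels se =>
      let start := max 0 se.1
      let e := min (total_frames - 1) se.2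
      (PySem.List.pyRange start (e + 1) 1).foldl
        (fun labels i => labels.set i.toNat state) labels) labels) labels

-- ===== PORT B =====
def labels_from_intervals_py_alt (states : List (String × List (Int × Int))) (total_frames : Int) (order : Option (List String)) (default_label : String) : List String :=
  let ord := match order with
    | none => ["inside", "exiting", "approaching", "outside"]
    | some o => o
  let rev := ord.reverse.map (fun st => (st, (PySem.Dict.mk states).getD st []))
  (PySem.List.pyRange 0 total_frames 1).map (fun i =>
    match rev.find? (fun p => p.2.any (fun se => decide (se.1 ≤ i ∧ i ≤ se.2))) with
    | some p => p.1
    | none => default_label)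

-- ===== PRECONDITION & SPEC =====
def Spec_labels_from_intervals_py (states : List (String × List (Int × Int))) (total_frames : Int) (order : Option (List String)) (default_label : String) (out : List String) : Prop := out = labels_from_intervals_py_alt states total_frames order default_label
instance (states : List (String × List (Int × Int))) (total_frames : Int) (order : Option (List String)) (default_label : String) (out : List String) : Decidable (Spec_labels_from_intervals_py states total_frames order default_label out) := by unfold Spec_labels_from_intervals_py; infer_instance

-- ===== CLAIM (what is proved, stated in full; the proofs are below) =====
def Claim_equal_labels_from_intervals_py : Prop := ∀ (states : List (String × List (Int × Int))) (total_frames : Int) (order : Option (List String)) (default_label : String), Dom_labels_from_intervals_py states total_frames order default_label → Spec_labels_from_intervals_py states total_frames order default_label (labels_from_intervals_py states total_frames order default_label)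

-- ===== LEMMAS AND PROOFS =====
theorem foldl_set_getElem? (v : String) :
    ∀ (fuel : Nat) (a b : Int), (b - a).toNat = fuel → ∀ (ls : List String), 0 ≤ a →
      b ≤ (ls.length : Int) → ∀ i : Nat,
      ((PySem.List.pyRange a b 1).foldl (fun l j => l.set j.toNat v) ls)[i]?
        = if a ≤ (i : Int) ∧ (i : Int) < b then some v else ls[i]? := by
  intro fuel
  induction fuel with
  | zero =>
    intro a b hf ls ha hb i
    rw [PySem.List.pyRange_one_eq_nil (by omega)]
    simp only [List.foldl_nil]
    rw [if_neg (by omega)]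
  | succ n ih =>
    intro a b hf ls ha hb i
    rw [PySem.List.pyRange_one_cons (by omega)]
    simp only [List.foldl_cons]
    rw [ih (a + 1) b (by omega) (ls.set a.toNat v) (by omega) (by simpa using hb) i]
    by_cases hia : (i : Int) = a
    · have hi : i = a.toNat := by omega
      have hlen : i < ls.length := by omega
      rw [if_neg (by omega), if_pos (by omega)]
      simp only [hi, List.getElem?_set]
      simp
      omega
    · by_cases h1 : a + 1 ≤ (i : Int) ∧ (i : Int) < b
      · rw [if_pos h1, if_pos (by omega)]
      · rw [if_neg h1, if_neg (by omega)]
        have : a.toNat ≠ i := by omega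
        simp [this]

def covI (tf : Int) (i : Nat) (se : Int × Int) : Bool :=
  decide (max 0 se.1 ≤ (i : Int) ∧ (i : Int) ≤ min (tf - 1) se.2)

def covS (states : List (String × List (Int × Int))) (tf : Int) (i : Nat) (st : String) : Bool :=
  ((PySem.Dict.mk states).getD st []).any (covI tf i)

theorem cov_lt {states : List (String × List (Int × Int))} {tf : Int} {i : Nat} {st : String}
    (h : covS states tf i st = true) : (i : Int) < tf := by
  unfold covS at h
  rw [List.any_eq_true] at h
  obtain ⟨se, _, hse⟩ := h
  unfold covI at hse
  rw [decide_eq_true_eq] at hse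
  omega

theorem foldl_set_len (v : String) :
    ∀ (L : List Int) (ls : List String),
      (L.foldl (fun l j => l.set j.toNat v) ls).length = ls.length := by
  intro L
  induction L with
  | nil => intro ls; rfl
  | cons a L ih => intro ls; simp only [List.foldl_cons]; rw [ih]; simp

theorem A_state (tf : Int) (st : String) :
    ∀ (ivs : List (Int × Int)) (ls : List String), ls.length = tf.toNat →
      ((ivs.foldl (fun l se =>
          (PySem.List.pyRange (max 0 se.1) (min (tf - 1) se.2 + 1) 1).foldl
            (fun l j => l.set j.toNat st) l) ls).length = ls.length)
      ∧ ∀ i : Nat,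
        (ivs.foldl (fun l se =>
          (PySem.List.pyRange (max 0 se.1) (min (tf - 1) se.2 + 1) 1).foldl
            (fun l j => l.set j.toNat st) l) ls)[i]?
          = if ivs.any (covI tf i) then some st else ls[i]? := by
  intro ivs
  induction ivs with
  | nil =>
    intro ls hl
    refine ⟨rfl, fun i => ?_⟩
    simp [List.any_nil]
  | cons iv rest ih =>
    intro ls hl
    simp only [List.foldl_cons]
    have hlen1 := foldl_set_len st (PySem.List.pyRange (max 0 iv.1) (min (tf - 1) iv.2 + 1) 1) ls
    obtain ⟨ihlen, ihget⟩ := ih _ (by rw [hlen1, hl])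
    have hchar := foldl_set_getElem? st ((min (tf - 1) iv.2 + 1) - max 0 iv.1).toNat
      (max 0 iv.1) (min (tf - 1) iv.2 + 1) rfl ls (by omega) (by omega)
    refine ⟨by rw [ihlen, hlen1], fun i => ?_⟩
    rw [ihget i, hchar i]
    cases hr : rest.any (covI tf i)
    · have hcv : (iv :: rest).any (covI tf i) = covI tf i iv := by
        simp [List.any_cons, hr]
      rw [hcv]
      by_cases hc : max 0 iv.1 ≤ (i : Int) ∧ (i : Int) < min (tf - 1) iv.2 + 1
      · rw [if_neg (by simp), if_pos hc, if_pos (by unfold covI; rw [decide_eq_true_eq]; omega)]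
      · rw [if_neg (by simp), if_neg hc, if_neg (by unfold covI; simp only [decide_eq_true_eq]; omega)]
    · rw [if_pos (by simp), if_pos (by simp [List.any_cons, hr])]

theorem A_order (states : List (String × List (Int × Int))) (tf : Int) :
    ∀ (L : List String) (ls : List String), ls.length = tf.toNat → ∀ i : Nat,
      (L.foldl (fun labels state =>
          ((PySem.Dict.mk states).getD state []).foldl (fun l se =>
            (PySem.List.pyRange (max 0 se.1) (min (tf - 1) se.2 + 1) 1).foldl
              (fun l j => l.set j.toNat state) l) labels) ls)[i]?
        = (ls[i]?).map (fun v => L.foldl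
            (fun v st => if covS states tf i st = true then st else v) v) := by
  intro L
  induction L with
  | nil =>
    intro ls hl i
    simp only [List.foldl_nil]
    cases ls[i]? <;> rfl
  | cons s rest ih =>
    intro ls hl i
    simp only [List.foldl_cons]
    obtain ⟨hlen, hget⟩ := A_state tf s ((PySem.Dict.mk states).getD s []) ls hl
    rw [ih _ (by rw [hlen, hl]) i, hget i]
    cases hv : ls[i]? with
    | none =>
      have hlenle : ls.length ≤ i := List.getElem?_eq_none_iff.mp hv
      have hni : ¬(((PySem.Dict.mk states).getD s []).any (covI tf i) = true) := by
        intro hcv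
        have h1 : (i : Int) < tf := cov_lt (show covS states tf i s = true from hcv)
        omega
      rw [if_neg hni]
      rfl
    | some v =>
      cases hcv : ((PySem.Dict.mk states).getD s []).any (covI tf i) <;>
        simp [covS, hcv]

theorem foldl_if_eq_find_getD (cov : String → Bool) :
    ∀ (L : List String) (v : String),
      L.foldl (fun v st => if cov st = true then st else v) v
        = (L.reverse.find? cov).getD v := by
  intro L
  induction L with
  | nil => intro v; rfl
  | cons s rest ih =>
    intro v
    simp only [List.foldl_cons, List.reverse_cons]
    rw [ih, List.find?_append]
    cases h : rest.reverse.find? cov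
    · cases hc : cov s <;> simp [hc]
    · simp

theorem cov_pred_eq (states : List (String × List (Int × Int))) (tf : Int) (i : Nat)
    (h0 : (i : Int) < tf) :
    ((fun p : String × List (Int × Int) =>
        p.2.any (fun se => decide (se.1 ≤ (i : Int) ∧ (i : Int) ≤ se.2)))
      ∘ (fun st => (st, (PySem.Dict.mk states).getD st [])))
      = covS states tf i := by
  funext st
  unfold covS
  simp only [Function.comp_apply]
  congr 1
  funext se
  unfold covI
  rw [decide_eq_decide]
  omega

-- ===== VERDICT (by name: the statement is the Claim_ definition above) =====
theorem labels_from_intervals_py_spec : Claim_equal_labels_from_intervals_py := by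
  intro states tf order dl _hdom
  unfold Spec_labels_from_intervals_py
  unfold labels_from_intervals_py labels_from_intervals_py_alt
  dsimp only
  generalize (match order with
    | none => ["inside", "exiting", "approaching", "outside"]
    | some o => o) = ord
  apply List.ext_getElem?
  intro i
  rw [A_order states tf ord (List.replicate tf.toNat dl) (by simp) i]
  rw [List.getElem?_replicate]
  rw [PySem.List.pyRange_one]
  rw [List.map_map, List.getElem?_map]
  by_cases hi : i < tf.toNat
  · rw [List.getElem?_range (show i < (tf - 0).toNat by omega), if_pos hi]
    simp only [Option.map_some, Function.comp_apply]
    rw [foldl_if_eq_find_getD]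
    rw [show ((0 : Int) + (i : Int)) = (i : Int) by omega]
    rw [List.find?_map, cov_pred_eq states tf i (by omega)]
    cases h : ord.reverse.find? (covS states tf i) <;> rfl
  · rw [List.getElem?_eq_none (by simp only [List.length_range]; omega), if_neg hi]
    rfl
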